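-- pv_equiv track=rewrite | github.com/antontomusiak/TopCoder | srm149/format_amt.py | amount
-- ===== SOURCE A (Python) =====
-- def amount(dollars, cents):
-- 	c = '00' + str(cents)
-- 	dollars = str(dollars)
-- 	dolls = [str(dollars[i]) for i in range(len(dollars))]
-- 	for i in range(len(dolls)-3, -1, -3):
-- 		dolls.insert(i, ',')
-- 	if dolls[0] == ',': dolls.remove(dolls[0])
--
-- 	return '$' + ''.join(dolls) + '.' + c[len(c)-2:len(c)]
-- ===== SOURCE B (Python) =====
-- def amount(dollars, cents):
--     s = str(dollars)
--     groups = [s[max(0, i - 3):i] for i in range(len(s), 0, -3)]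
--     return '$' + ','.join(reversed(groups)) + '.' + ('00' + str(cents))[-2:]
-- ===== Notes on version B (the rewrite author's own statement) =====
-- stated objective: simpler
-- what changed: Replaces the char-list explosion, the right-to-left list.insert comma loop and the leading-comma removal with slicing str(dollars) into 3-char chunks from the right and joining them with commas.
import Mathlib
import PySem

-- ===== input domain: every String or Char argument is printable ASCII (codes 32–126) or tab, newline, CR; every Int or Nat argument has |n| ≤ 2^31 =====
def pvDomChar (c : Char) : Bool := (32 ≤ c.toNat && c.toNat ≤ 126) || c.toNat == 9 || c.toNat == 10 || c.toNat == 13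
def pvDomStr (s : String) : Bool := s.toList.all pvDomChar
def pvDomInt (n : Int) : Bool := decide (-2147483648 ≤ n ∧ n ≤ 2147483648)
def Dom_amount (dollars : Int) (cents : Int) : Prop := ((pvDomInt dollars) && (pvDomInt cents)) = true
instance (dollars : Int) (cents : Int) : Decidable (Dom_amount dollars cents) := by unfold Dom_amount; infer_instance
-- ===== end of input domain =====

-- B builds the comma-grouped dollar string by slicing str(dollars) into 3-char chunks from the
-- right and joining them, instead of A's per-char list, right-to-left insert loop and
-- leading-comma removal; objective: simpler.


-- ===== PORT A =====
def amount (dollars : Int) (cents : Int) : String :=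
  let c : List Char := "00".toList ++ PySem.Int.toChars cents
  let ds : List Char := PySem.Int.toChars dollars
  -- dolls = [str(dollars[i]) for i in range(len(dollars))]  (each element a 1-char string)
  let dolls : List Char := (PySem.List.pyRange 0 (ds.length : Int) 1).map
      (fun i => PySem.List.pyGetD ds i ' ')
  -- for i in range(len(dolls)-3, -1, -3): dolls.insert(i, ',')
  let dolls : List Char := (PySem.List.pyRange ((dolls.length : Int) - 3) (-1) (-3)).foldl
      (fun acc i => PySem.List.insert acc i ',') dolls
  -- if dolls[0] == ',': dolls.remove(dolls[0])
  let dolls : List Char :=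
    if PySem.List.pyGet? dolls 0 = some ',' then (PySem.List.remove? dolls ',').getD dolls
    else dolls
  String.ofList ('$' :: dolls ++ '.' ::
    PySem.List.slice c (some ((c.length : Int) - 2)) (some (c.length : Int)))

-- ===== PORT B =====
def amount_alt (dollars : Int) (cents : Int) : String :=
  let s : List Char := PySem.Int.toChars dollars
  -- groups = [s[max(0, i - 3):i] for i in range(len(s), 0, -3)]
  let groups : List (List Char) := (PySem.List.pyRange (s.length : Int) 0 (-3)).map
      (fun i => PySem.List.slice s (some (max 0 (i - 3))) (some i))
  -- '$' + ','.join(reversed(groups)) + '.' + ('00' + str(cents))[-2:]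
  String.ofList ('$' :: List.intercalate [','] groups.reverse ++ '.' ::
    PySem.List.slice ("00".toList ++ PySem.Int.toChars cents) (some (-2)) none)

-- ===== PRECONDITION & SPEC =====
def Spec_amount (dollars : Int) (cents : Int) (out : String) : Prop := out = amount_alt dollars cents
instance (dollars : Int) (cents : Int) (out : String) : Decidable (Spec_amount dollars cents out) := by unfold Spec_amount; infer_instance

-- ===== CLAIM (what is proved, stated in full; the proofs are below) =====
def Claim_equal_amount : Prop := ∀ (dollars : Int) (cents : Int), Dom_amount dollars cents → Spec_amount dollars cents (amount dollars cents)

-- ===== LEMMAS AND PROOFS =====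

-- A's insert loop, as a structural recursion on the (Nat) start position.
def ins3 (p : Nat) (xs : List Char) : List Char :=
  if p < 3 then PySem.List.insert xs (p : Int) ','
  else ins3 (p - 3) (PySem.List.insert xs (p : Int) ',')

-- The common grouped form: 3-char groups from the right, comma-separated.
def grp3 (xs : List Char) : List Char :=
  if _h : xs.length ≤ 3 then xs
  else grp3 (xs.take (xs.length - 3)) ++ ',' :: xs.drop (xs.length - 3)
termination_by xs.length
decreasing_by simp; omega

-- pyRange with step -3: cons / nil unfoldings
theorem pyRange_neg3_nil {a b : Int} (h : a ≤ b) : PySem.List.pyRange a b (-3) = [] := by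
  unfold PySem.List.pyRange
  norm_num
  intro h'
  omega

theorem pyRange_neg3_cons {a b : Int} (h : b < a) :
    PySem.List.pyRange a b (-3) = a :: PySem.List.pyRange (a - 3) b (-3) := by
  unfold PySem.List.pyRange
  norm_num [h]
  by_cases h4 : b < a - 3
  · rw [if_pos h4]
    have hc : ((a - b + 3 - 1) / 3).toNat = ((a - 3 - b + 3 - 1) / 3).toNat + 1 := by omega
    rw [hc, List.range_succ_eq_map, List.map_cons, List.map_map]
    refine List.cons_eq_cons.mpr ⟨by norm_num, ?_⟩
    apply List.map_congr_left; intro k _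
    simp [Function.comp]; ring
  · rw [if_neg h4]
    have hc : ((a - b + 3 - 1) / 3).toNat = 1 := by omega
    rw [hc]
    simp

theorem mem_pyRange_neg3 {a b x : Int} (hx : x ∈ PySem.List.pyRange a b (-3)) : b < x ∧ x ≤ a := by
  unfold PySem.List.pyRange at hx
  norm_num at hx
  by_cases hab : b < a
  · rw [if_pos hab] at hx
    simp at hx
    obtain ⟨k, hk, rfl⟩ := hx
    omega
  · rw [if_neg hab] at hx; simp at hx

-- the foldl over range(p, -1, -3) is ins3 p
theorem foldA (p : Nat) (xs : List Char) :
    (PySem.List.pyRange (p : Int) (-1) (-3)).foldl (fun acc i => PySem.List.insert acc i ',') xs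
      = ins3 p xs := by
  unfold ins3
  by_cases h3 : p < 3
  · rw [if_pos h3, pyRange_neg3_cons (by omega : (-1 : Int) < p),
      pyRange_neg3_nil (by omega : (p : Int) - 3 ≤ -1)]
    simp
  · rw [if_neg h3, pyRange_neg3_cons (by omega : (-1 : Int) < p)]
    simp only [List.foldl_cons]
    rw [show ((p : Int) - 3) = ((p - 3 : Nat) : Int) by omega]
    exact foldA (p - 3) _
termination_by p
decreasing_by omega

theorem ins3_append (p : Nat) (u v : List Char) (h : p ≤ u.length) :
    ins3 p (u ++ v) = ins3 p u ++ v := by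
  have hins : PySem.List.insert (u ++ v) (p : Int) ',' = PySem.List.insert u (p : Int) ',' ++ v := by
    rw [PySem.List.insert_natCast _ p _ (by simp; omega), PySem.List.insert_natCast u p _ h,
      List.take_append_of_le_length h, List.drop_append_of_le_length h]
    simp
  unfold ins3
  by_cases h3 : p < 3
  · rw [if_pos h3, if_pos h3, hins]
  · rw [if_neg h3, if_neg h3, hins]
    refine ins3_append (p - 3) _ v ?_
    rw [PySem.List.insert_natCast u p _ h]
    simp; omega
termination_by p
decreasing_by omega

theorem ins3_grp3 (n : Nat) (cs : List Char) (hlen : cs.length = n) (h3 : 3 ≤ n) :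
    ins3 (n - 3) cs = if n % 3 = 0 then ',' :: grp3 cs else grp3 cs := by
  by_cases h6 : n < 6
  · rw [ins3, if_pos (by omega : n - 3 < 3), PySem.List.insert_natCast cs (n - 3) ',' (by omega)]
    interval_cases n
    · rw [grp3]; simp [hlen]
    · have hg : grp3 cs = cs.take 1 ++ ',' :: cs.drop 1 := by
        rw [grp3, dif_neg (by omega : ¬ cs.length ≤ 3),
          grp3, dif_pos (by simp [hlen] : (cs.take (cs.length - 3)).length ≤ 3)]
        simp [hlen]
      simp [hg]
    · have hg : grp3 cs = cs.take 2 ++ ',' :: cs.drop 2 := by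
        rw [grp3, dif_neg (by omega : ¬ cs.length ≤ 3),
          grp3, dif_pos (by simp [hlen] : (cs.take (cs.length - 3)).length ≤ 3)]
        simp [hlen]
      simp [hg]
  · rw [ins3, if_neg (by omega : ¬ n - 3 < 3), PySem.List.insert_natCast cs (n - 3) ',' (by omega)]
    rw [ins3_append (n - 3 - 3) (cs.take (n - 3)) (',' :: cs.drop (n - 3)) (by simp [hlen])]
    rw [ins3_grp3 (n - 3) (cs.take (n - 3)) (by simp [hlen]) (by omega)]
    have hg : grp3 cs = grp3 (cs.take (cs.length - 3)) ++ ',' :: cs.drop (cs.length - 3) := by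
      rw [grp3, dif_neg (by omega)]
    rw [hlen] at hg
    have hmod : (n - 3) % 3 = n % 3 := by omega
    rw [hg, hmod]
    split_ifs <;> simp

theorem grp3_head (cs : List Char) : (grp3 cs).head? = cs.head? := by
  match cs with
  | [] => rw [grp3]; rfl
  | c :: t =>
    rw [grp3]
    split
    · rfl
    · rename_i hlen
      have hlt : 3 ≤ t.length := by simp at hlen; omega
      have ht : (c :: t).take ((c :: t).length - 3) = c :: t.take (t.length - 3) := by
        rw [show (c :: t).length - 3 = (t.length - 3) + 1 by simp; omega, List.take_succ_cons]
      rw [ht, List.head?_append, grp3_head (c :: t.take (t.length - 3))]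
      simp
termination_by cs.length
decreasing_by simp; omega

theorem intercalate_append_singleton (sep : List Char) (l : List (List Char)) (x : List Char)
    (h : l ≠ []) :
    List.intercalate sep (l ++ [x]) = List.intercalate sep l ++ sep ++ x := by
  have step : ∀ (a b : List Char) (t : List (List Char)),
      List.intercalate sep (a :: b :: t) = a ++ sep ++ List.intercalate sep (b :: t) := by
    intro a b t
    simp [List.intercalate]
  induction l with
  | nil => simp at h
  | cons a t ih =>
    cases t with
    | nil => simp [List.intercalate]
    | cons b t2 =>
      rw [show (a :: b :: t2) ++ [x] = a :: b :: (t2 ++ [x]) from rfl,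
        step a b (t2 ++ [x]), step a b t2,
        show b :: (t2 ++ [x]) = (b :: t2) ++ [x] from rfl, ih (by simp)]
      simp [List.append_assoc]

theorem slice_prefix (u v : List Char) (i : Int) (h0 : 0 < i) (hi : i ≤ (u.length : Int)) :
    PySem.List.slice (u ++ v) (some (max 0 (i - 3))) (some i)
      = PySem.List.slice u (some (max 0 (i - 3))) (some i) := by
  set a := max 0 (i - 3) with ha
  have h0a : 0 ≤ a := le_max_left _ _
  have hai : a ≤ i := by omega
  rw [PySem.List.slice_of_nonneg _ h0a (by omega) (by simp; omega) (by simp; omega),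
    PySem.List.slice_of_nonneg _ h0a (by omega) (by omega) hi,
    List.drop_append_of_le_length (by omega : a.toNat ≤ u.length),
    List.take_append_of_le_length (by simp; omega : i.toNat - a.toNat ≤ (u.drop a.toNat).length)]

-- B's grouped body equals grp3
theorem Bbody_eq_grp3 (cs : List Char) :
    List.intercalate [','] (((PySem.List.pyRange (cs.length : Int) 0 (-3)).map
        (fun i => PySem.List.slice cs (some (max 0 (i - 3))) (some i))).reverse)
      = grp3 cs := by
  by_cases h0 : cs.length = 0
  · rw [List.eq_nil_of_length_eq_zero h0]
    rw [show ((([] : List Char).length : Int)) = 0 from rfl, pyRange_neg3_nil le_rfl]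
    rw [grp3]
    simp [List.intercalate]
  by_cases h3 : cs.length ≤ 3
  · rw [pyRange_neg3_cons (by omega : (0 : Int) < (cs.length : Int))]
    rw [pyRange_neg3_nil (by omega : (cs.length : Int) - 3 ≤ 0)]
    simp only [List.map_cons, List.map_nil, List.reverse_cons, List.reverse_nil, List.nil_append]
    rw [show max 0 ((cs.length : Int) - 3) = 0 by omega]
    rw [PySem.List.slice_zero_start, PySem.List.slice_to _ (by positivity)]
    simp [List.intercalate]
    rw [grp3, dif_pos h3]
  · have h4 : 3 < cs.length := by omega
    rw [pyRange_neg3_cons (by omega : (0 : Int) < (cs.length : Int))]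
    simp only [List.map_cons, List.reverse_cons]
    have hslice : PySem.List.slice cs (some (max 0 ((cs.length : Int) - 3))) (some (cs.length : Int))
        = cs.drop (cs.length - 3) := by
      rw [show max 0 ((cs.length : Int) - 3) = (cs.length : Int) - 3 by omega]
      rw [PySem.List.slice_of_nonneg _ (by omega) (by omega) (by omega) (by omega)]
      rw [show ((cs.length : Int)).toNat = cs.length by omega,
        show ((cs.length : Int) - 3).toNat = cs.length - 3 by omega]
      apply List.take_of_length_le
      simp
    rw [hslice]
    have hu : cs = cs.take (cs.length - 3) ++ cs.drop (cs.length - 3) :=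
      (List.take_append_drop _ _).symm
    have hmap : (PySem.List.pyRange ((cs.length : Int) - 3) 0 (-3)).map
          (fun i => PySem.List.slice cs (some (max 0 (i - 3))) (some i))
        = (PySem.List.pyRange (((cs.take (cs.length - 3)).length : Int)) 0 (-3)).map
          (fun i => PySem.List.slice (cs.take (cs.length - 3)) (some (max 0 (i - 3))) (some i)) := by
      have hlen : ((cs.take (cs.length - 3)).length : Int) = (cs.length : Int) - 3 := by
        simp; omega
      rw [hlen]
      apply List.map_congr_left
      intro i hi
      have hmem := mem_pyRange_neg3 hi
      conv_lhs => rw [hu]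
      exact slice_prefix _ _ i hmem.1 (by simp; omega)
    rw [hmap]
    rw [intercalate_append_singleton _ _ _ (by
      rw [pyRange_neg3_cons (by simp; omega : (0 : Int) < ((cs.take (cs.length - 3)).length : Int))]
      simp)]
    rw [Bbody_eq_grp3 (cs.take (cs.length - 3))]
    conv_rhs => rw [grp3]
    rw [dif_neg (by omega)]
    simp
termination_by cs.length
decreasing_by simp; omega

theorem digitChar_ne_comma (m : Nat) : Nat.digitChar m ≠ ',' := by
  by_cases h : m < 16
  · interval_cases m <;> decide
  · have h16 : Nat.digitChar m = '*' := by
      unfold Nat.digitChar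
      rw [if_neg (by omega), if_neg (by omega), if_neg (by omega), if_neg (by omega),
        if_neg (by omega), if_neg (by omega), if_neg (by omega), if_neg (by omega),
        if_neg (by omega), if_neg (by omega), if_neg (by omega), if_neg (by omega),
        if_neg (by omega), if_neg (by omega), if_neg (by omega), if_neg (by omega)]
    rw [h16]; decide

theorem toDigitsCore_no_comma (b fuel n : Nat) (ds : List Char) (h : ',' ∉ ds) :
    ',' ∉ Nat.toDigitsCore b fuel n ds := by
  induction fuel generalizing n ds with
  | zero => simpa [Nat.toDigitsCore] using h
  | succ f ih =>
    rw [Nat.toDigitsCore]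
    split
    · simp only [List.mem_cons, not_or]
      exact ⟨fun hc => digitChar_ne_comma _ hc.symm, h⟩
    · exact ih _ _ (by
        simp only [List.mem_cons, not_or]
        exact ⟨fun hc => digitChar_ne_comma _ hc.symm, h⟩)

theorem toDigitsCore_length_le (b fuel n : Nat) (ds : List Char) :
    ds.length ≤ (Nat.toDigitsCore b fuel n ds).length := by
  induction fuel generalizing n ds with
  | zero => simp [Nat.toDigitsCore]
  | succ f ih =>
    rw [Nat.toDigitsCore]
    split
    · simp
    · exact le_trans (by simp) (ih (n / b) (Nat.digitChar (n % b) :: ds))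

-- no comma among the characters of str(n)
theorem comma_not_mem_toChars (n : Int) : ',' ∉ PySem.Int.toChars n := by
  unfold PySem.Int.toChars
  split
  · simp only [List.mem_cons, not_or]
    exact ⟨by decide, toDigitsCore_no_comma _ _ _ _ (by simp)⟩
  · exact toDigitsCore_no_comma _ _ _ _ (by simp)

theorem toChars_ne_nil (n : Int) : PySem.Int.toChars n ≠ [] := by
  unfold PySem.Int.toChars
  split
  · simp
  · intro hnil
    have h1 : 1 ≤ (Nat.toDigits 10 n.toNat).length := by
      rw [Nat.toDigits, Nat.toDigitsCore]
      split
      · simp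
      · exact le_trans (by simp) (toDigitsCore_length_le _ _ _ _)
    rw [hnil] at h1
    simp at h1

-- the cents slice: both ports take the last two characters
theorem cents_slice (c : List Char) (h : 2 ≤ c.length) :
    PySem.List.slice c (some ((c.length : Int) - 2)) (some (c.length : Int))
      = PySem.List.slice c (some (-2)) none := by
  rw [PySem.List.slice_from_neg_ofNat c 2 (by norm_num)]
  rw [PySem.List.slice_of_nonneg _ (by omega) (by omega) (by omega) (by omega)]
  rw [show ((c.length : Int) - 2).toNat = c.length - 2 by omega,
    show ((c.length : Int)).toNat = c.length by omega]
  apply List.take_of_length_le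
  simp

theorem pyGet?_zero_head (l : List Char) : PySem.List.pyGet? l 0 = l.head? := by
  cases l <;> simp [PySem.List.pyGet?, PySem.List.pyIdx?]

-- main body lemma
theorem body_eq (cs : List Char) (hne : cs ≠ []) (hc : ',' ∉ cs) :
    (if PySem.List.pyGet? ((PySem.List.pyRange ((cs.length : Int) - 3) (-1) (-3)).foldl
          (fun acc i => PySem.List.insert acc i ',') cs) 0 = some ','
      then (PySem.List.remove? ((PySem.List.pyRange ((cs.length : Int) - 3) (-1) (-3)).foldl
          (fun acc i => PySem.List.insert acc i ',') cs) ',').getD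
          ((PySem.List.pyRange ((cs.length : Int) - 3) (-1) (-3)).foldl
          (fun acc i => PySem.List.insert acc i ',') cs)
      else (PySem.List.pyRange ((cs.length : Int) - 3) (-1) (-3)).foldl
          (fun acc i => PySem.List.insert acc i ',') cs)
      = List.intercalate [','] (((PySem.List.pyRange (cs.length : Int) 0 (-3)).map
          (fun i => PySem.List.slice cs (some (max 0 (i - 3))) (some i))).reverse) := by
  have hhead : cs.head? ≠ some ',' := by
    cases cs with
    | nil => simp
    | cons c t =>
      simp only [List.mem_cons, not_or] at hc
      simp only [List.head?_cons, ne_eq, Option.some.injEq]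
      exact fun e => hc.1 e.symm
  rw [Bbody_eq_grp3]
  by_cases h3 : 3 ≤ cs.length
  · have hfold : (PySem.List.pyRange ((cs.length : Int) - 3) (-1) (-3)).foldl
        (fun acc i => PySem.List.insert acc i ',') cs = ins3 (cs.length - 3) cs := by
      rw [show ((cs.length : Int) - 3) = ((cs.length - 3 : Nat) : Int) by omega]
      exact foldA _ _
    rw [hfold, ins3_grp3 cs.length cs rfl h3]
    by_cases hm : cs.length % 3 = 0
    · rw [if_pos hm, if_pos (by rw [pyGet?_zero_head]; rfl), PySem.List.remove?_cons_self]
      rfl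
    · rw [if_neg hm, if_neg (by rw [pyGet?_zero_head, grp3_head]; exact hhead)]
  · rw [pyRange_neg3_nil (by omega : (cs.length : Int) - 3 ≤ -1), List.foldl_nil,
      if_neg (by rw [pyGet?_zero_head]; exact hhead), grp3, dif_pos (by omega)]

-- ===== VERDICT (by name: the statement is the Claim_ definition above) =====
theorem amount_spec : Claim_equal_amount := by
  intro dollars cents _
  unfold Spec_amount amount amount_alt
  dsimp only
  rw [PySem.List.map_pyGetD_pyRange_zero']
  rw [body_eq _ (toChars_ne_nil dollars) (comma_not_mem_toChars dollars)]
  rw [cents_slice _ (by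
    rw [List.length_append]
    have h2 : ("00".toList).length = 2 := rfl
    omega)]
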